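-- pv_equiv track=rewrite | github.com/bitcaster-io/bitcaster | src/bitcaster/utils/ttl.py | encode_ttl
-- ===== SOURCE A (Python) =====
-- from collections import defaultdict
--
-- MINUTE = 60
--
-- HOUR = MINUTE * 60
--
-- DAY = HOUR * 24
--
-- WEEK = DAY * 7
--
-- YEAR = DAY * 365
--
-- def encode_ttl(value):
--     values = defaultdict(lambda: 0, y=0, w=0, d=0, h=0, m=0, s=0)
--     v = value
--     while v > 0:
--         if v < MINUTE:
--             values['s'] = v
--             v -= v
--         elif v < HOUR:
--             values['m'] = v // MINUTE
--             v -= values['m'] * MINUTE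
--         elif v < DAY:
--             values['h'] = v // HOUR
--             v -= values['h'] * HOUR
--         elif v < WEEK:
--             values['d'] = v // DAY
--             v -= values['d'] * DAY
--         elif v < YEAR:
--             values['w'] = v // WEEK
--             v -= values['w'] * WEEK
--         elif v >= YEAR:
--             values['y'] = v // YEAR
--             v -= values['y'] * YEAR
--         else:
--             v = 0
--     ret = []
--     for unit in ['y', 'w', 'd', 'h', 'm', 's']:
--         if values[unit]:
--             ret.append('%d%s' % (values[unit], unit))
--
--     return ''.join(ret)
-- ===== SOURCE B (Python) =====
-- MINUTE = 60
-- HOUR = MINUTE * 60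
-- DAY = HOUR * 24
-- WEEK = DAY * 7
-- YEAR = DAY * 365
--
-- def encode_ttl(value):
--     if value <= 0:
--         return ''
--     y, rem = divmod(value, YEAR)
--     w, rem = divmod(rem, WEEK)
--     d, rem = divmod(rem, DAY)
--     h, rem = divmod(rem, HOUR)
--     m, s = divmod(rem, MINUTE)
--     return ''.join('%d%s' % (n, u)
--                    for n, u in ((y, 'y'), (w, 'w'), (d, 'd'), (h, 'h'), (m, 'm'), (s, 's'))
--                    if n)
-- ===== Notes on version B (the rewrite author's own statement) =====
-- stated objective: simpler
-- what changed: Replaces A's conditional one-unit-per-iteration while loop over a defaultdict with a straight-line cascade of divmod calls and a single join over (count,label) pairs.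
import Mathlib
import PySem

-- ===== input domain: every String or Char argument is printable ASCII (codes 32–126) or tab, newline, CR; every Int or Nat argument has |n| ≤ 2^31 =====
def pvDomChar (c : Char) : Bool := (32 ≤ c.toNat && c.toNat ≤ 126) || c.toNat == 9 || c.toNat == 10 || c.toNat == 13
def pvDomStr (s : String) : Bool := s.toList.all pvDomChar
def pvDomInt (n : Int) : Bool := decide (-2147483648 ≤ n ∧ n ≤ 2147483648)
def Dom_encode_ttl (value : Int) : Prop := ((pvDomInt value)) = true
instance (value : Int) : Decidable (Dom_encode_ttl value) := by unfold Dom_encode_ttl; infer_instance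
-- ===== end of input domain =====

-- B replaces A's one-unit-per-iteration while loop by a straight-line cascade of divmods; objective: simpler.

def MINUTE : Int := 60
def HOUR : Int := MINUTE * 60
def DAY : Int := HOUR * 24
def WEEK : Int := DAY * 7
def YEAR : Int := DAY * 365

-- ===== PORT A =====
-- the while loop of A: state = (v, values)
def encodeLoop (v : Int) (values : PySem.Dict String Int) : PySem.Dict String Int :=
  if h : v > 0 then
    if h1 : v < MINUTE then
      encodeLoop (v - v) (values.insert "s" v)
    else if h2 : v < HOUR then
      encodeLoop (v - PySem.Int.floordiv v MINUTE * MINUTE) (values.insert "m" (PySem.Int.floordiv v MINUTE))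
    else if h3 : v < DAY then
      encodeLoop (v - PySem.Int.floordiv v HOUR * HOUR) (values.insert "h" (PySem.Int.floordiv v HOUR))
    else if h4 : v < WEEK then
      encodeLoop (v - PySem.Int.floordiv v DAY * DAY) (values.insert "d" (PySem.Int.floordiv v DAY))
    else if h5 : v < YEAR then
      encodeLoop (v - PySem.Int.floordiv v WEEK * WEEK) (values.insert "w" (PySem.Int.floordiv v WEEK))
    else if h6 : v ≥ YEAR then
      encodeLoop (v - PySem.Int.floordiv v YEAR * YEAR) (values.insert "y" (PySem.Int.floordiv v YEAR))
    else
      encodeLoop 0 values  -- Python's unreachable 'else: v = 0'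
  else values
termination_by v.toNat
decreasing_by
  · omega
  · have hd := PySem.Int.floordiv_mul_add_mod v MINUTE
    have h0 := PySem.Int.mod_nonneg v (show (0:Int) < MINUTE by simp [MINUTE])
    have hl := PySem.Int.mod_lt v (show (0:Int) < MINUTE by simp [MINUTE])
    simp [MINUTE] at *; omega
  · have hd := PySem.Int.floordiv_mul_add_mod v HOUR
    have h0 := PySem.Int.mod_nonneg v (show (0:Int) < HOUR by simp [HOUR, MINUTE])
    have hl := PySem.Int.mod_lt v (show (0:Int) < HOUR by simp [HOUR, MINUTE])
    simp [HOUR, MINUTE] at *; omega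
  · have hd := PySem.Int.floordiv_mul_add_mod v DAY
    have h0 := PySem.Int.mod_nonneg v (show (0:Int) < DAY by simp [DAY, HOUR, MINUTE])
    have hl := PySem.Int.mod_lt v (show (0:Int) < DAY by simp [DAY, HOUR, MINUTE])
    simp [DAY, HOUR, MINUTE] at *; omega
  · have hd := PySem.Int.floordiv_mul_add_mod v WEEK
    have h0 := PySem.Int.mod_nonneg v (show (0:Int) < WEEK by simp [WEEK, DAY, HOUR, MINUTE])
    have hl := PySem.Int.mod_lt v (show (0:Int) < WEEK by simp [WEEK, DAY, HOUR, MINUTE])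
    simp [WEEK, DAY, HOUR, MINUTE] at *; omega
  · have hd := PySem.Int.floordiv_mul_add_mod v YEAR
    have h0 := PySem.Int.mod_nonneg v (show (0:Int) < YEAR by simp [YEAR, DAY, HOUR, MINUTE])
    have hl := PySem.Int.mod_lt v (show (0:Int) < YEAR by simp [YEAR, DAY, HOUR, MINUTE])
    simp [YEAR, DAY, HOUR, MINUTE] at *; omega
  · omega

def encode_ttl (value : Int) : String :=
  let values0 : PySem.Dict String Int :=
    PySem.Dict.ofList [("y", 0), ("w", 0), ("d", 0), ("h", 0), ("m", 0), ("s", 0)]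
  let values := encodeLoop value values0
  let ret := ["y", "w", "d", "h", "m", "s"].foldl
    (fun ret unit => if values.getD unit 0 ≠ 0 then ret ++ [PySem.Int.toStr (values.getD unit 0) ++ unit] else ret) []
  PySem.Str.join "" ret

-- ===== PORT B =====
def encode_ttl_alt (value : Int) : String :=
  if value ≤ 0 then ""
  else
    let y := PySem.Int.floordiv value YEAR
    let rem := PySem.Int.mod value YEAR
    let w := PySem.Int.floordiv rem WEEK
    let rem := PySem.Int.mod rem WEEK
    let d := PySem.Int.floordiv rem DAY
    let rem := PySem.Int.mod rem DAY
    let h := PySem.Int.floordiv rem HOUR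
    let rem := PySem.Int.mod rem HOUR
    let m := PySem.Int.floordiv rem MINUTE
    let s := PySem.Int.mod rem MINUTE
    PySem.Str.join ""
      ((([(y, "y"), (w, "w"), (d, "d"), (h, "h"), (m, "m"), (s, "s")].filter
          (fun p => p.1 ≠ 0)).map (fun p => PySem.Int.toStr p.1 ++ p.2)))

-- ===== PRECONDITION & SPEC =====
def Spec_encode_ttl (value : Int) (out : String) : Prop := out = encode_ttl_alt value
instance (value : Int) (out : String) : Decidable (Spec_encode_ttl value out) := by unfold Spec_encode_ttl; infer_instance

-- ===== CLAIM (what is proved, stated in full; the proofs are below) =====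
def Claim_equal_encode_ttl : Prop := ∀ (value : Int), Dom_encode_ttl value → Spec_encode_ttl value (encode_ttl value)

-- ===== LEMMAS AND PROOFS =====

-- conditional insert: what A's loop does to the dict for one unit (skipped when the count is 0)
def condIns (d : PySem.Dict String Int) (k : String) (n : Int) : PySem.Dict String Int :=
  if n = 0 then d else d.insert k n

theorem pos_MINUTE : (0:Int) < MINUTE := by norm_num [MINUTE]
theorem pos_HOUR : (0:Int) < HOUR := by norm_num [HOUR, MINUTE]
theorem pos_DAY : (0:Int) < DAY := by norm_num [DAY, HOUR, MINUTE]
theorem pos_WEEK : (0:Int) < WEEK := by norm_num [WEEK, DAY, HOUR, MINUTE]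
theorem pos_YEAR : (0:Int) < YEAR := by norm_num [YEAR, WEEK, DAY, HOUR, MINUTE]
theorem lt_MINUTE_HOUR : MINUTE < HOUR := by norm_num [HOUR, MINUTE]
theorem lt_MINUTE_DAY : MINUTE < DAY := by norm_num [DAY, HOUR, MINUTE]
theorem lt_HOUR_DAY : HOUR < DAY := by norm_num [DAY, HOUR, MINUTE]
theorem lt_MINUTE_WEEK : MINUTE < WEEK := by norm_num [WEEK, DAY, HOUR, MINUTE]
theorem lt_HOUR_WEEK : HOUR < WEEK := by norm_num [WEEK, DAY, HOUR, MINUTE]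
theorem lt_DAY_WEEK : DAY < WEEK := by norm_num [WEEK, DAY, HOUR, MINUTE]
theorem lt_MINUTE_YEAR : MINUTE < YEAR := by norm_num [YEAR, WEEK, DAY, HOUR, MINUTE]
theorem lt_HOUR_YEAR : HOUR < YEAR := by norm_num [YEAR, WEEK, DAY, HOUR, MINUTE]
theorem lt_DAY_YEAR : DAY < YEAR := by norm_num [YEAR, WEEK, DAY, HOUR, MINUTE]
theorem lt_WEEK_YEAR : WEEK < YEAR := by norm_num [YEAR, WEEK, DAY, HOUR, MINUTE]

theorem fdiv_small {v b : Int} (hb : 0 < b) (h0 : 0 ≤ v) (h : v < b) :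
    PySem.Int.floordiv v b = 0 := by
  rw [PySem.Int.floordiv_eq_iff_of_pos hb]; constructor <;> [simpa; simpa]

theorem mod_small {v b : Int} (hb : 0 < b) (h0 : 0 ≤ v) (h : v < b) :
    PySem.Int.mod v b = v := by
  have hd := PySem.Int.floordiv_mul_add_mod v b
  rw [fdiv_small hb h0 h] at hd; omega

theorem loop_S (v : Int) (d : PySem.Dict String Int) (h0 : 0 ≤ v) (hb : v < MINUTE) :
    encodeLoop v d = condIns d "s" v := by
  by_cases hv : v > 0
  · rw [encodeLoop]
    simp only [hv, hb, dif_pos]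
    rw [show v - v = (0:Int) by ring, encodeLoop]
    simp [condIns, show v ≠ 0 by omega]
  · have hz : v = 0 := by omega
    subst hz
    rw [encodeLoop]
    simp [condIns]

theorem loop_M (v : Int) (d : PySem.Dict String Int) (h0 : 0 ≤ v) (hlt : v < HOUR) :
    encodeLoop v d = condIns (condIns (d) "m" (PySem.Int.floordiv v MINUTE)) "s" (PySem.Int.mod v MINUTE) := by
  by_cases hb : v < MINUTE
  · rw [fdiv_small pos_MINUTE h0 hb, mod_small pos_MINUTE h0 hb]
    rw [show condIns d "m" 0 = d by simp [condIns]]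
    exact loop_S v d h0 hb
  · have hv : v > 0 := by linarith [not_lt.1 hb, pos_MINUTE]
    rw [encodeLoop, dif_pos hv, dif_neg hb, dif_pos hlt]
    rw [show v - PySem.Int.floordiv v MINUTE * MINUTE = PySem.Int.mod v MINUTE by
      have := PySem.Int.floordiv_mul_add_mod v MINUTE; linarith]
    rw [loop_S _ _ (PySem.Int.mod_nonneg v pos_MINUTE) (PySem.Int.mod_lt v pos_MINUTE)]
    rw [show condIns d "m" (PySem.Int.floordiv v MINUTE) = d.insert "m" (PySem.Int.floordiv v MINUTE) by
      have h1 : (1:Int) ≤ PySem.Int.floordiv v MINUTE := by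
        rw [PySem.Int.le_floordiv_iff_mul_le pos_MINUTE]; linarith [not_lt.1 hb]
      unfold condIns
      rw [if_neg (by omega)]]


theorem loop_H (v : Int) (d : PySem.Dict String Int) (h0 : 0 ≤ v) (hlt : v < DAY) :
    encodeLoop v d = condIns (condIns (condIns (d) "h" (PySem.Int.floordiv v HOUR)) "m" (PySem.Int.floordiv (PySem.Int.mod v HOUR) MINUTE)) "s" (PySem.Int.mod (PySem.Int.mod v HOUR) MINUTE) := by
  by_cases hb : v < HOUR
  · rw [fdiv_small pos_HOUR h0 hb, mod_small pos_HOUR h0 hb]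
    rw [show condIns d "h" 0 = d by simp [condIns]]
    exact loop_M v d h0 hb
  · have hv : v > 0 := by linarith [not_lt.1 hb, pos_HOUR]
    rw [encodeLoop, dif_pos hv, dif_neg (show ¬ v < MINUTE by linarith [not_lt.1 hb, lt_MINUTE_HOUR]), dif_neg hb, dif_pos hlt]
    rw [show v - PySem.Int.floordiv v HOUR * HOUR = PySem.Int.mod v HOUR by
      have := PySem.Int.floordiv_mul_add_mod v HOUR; linarith]
    rw [loop_M _ _ (PySem.Int.mod_nonneg v pos_HOUR) (PySem.Int.mod_lt v pos_HOUR)]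
    rw [show condIns d "h" (PySem.Int.floordiv v HOUR) = d.insert "h" (PySem.Int.floordiv v HOUR) by
      have h1 : (1:Int) ≤ PySem.Int.floordiv v HOUR := by
        rw [PySem.Int.le_floordiv_iff_mul_le pos_HOUR]; linarith [not_lt.1 hb]
      unfold condIns
      rw [if_neg (by omega)]]


theorem loop_D (v : Int) (d : PySem.Dict String Int) (h0 : 0 ≤ v) (hlt : v < WEEK) :
    encodeLoop v d = condIns (condIns (condIns (condIns (d) "d" (PySem.Int.floordiv v DAY)) "h" (PySem.Int.floordiv (PySem.Int.mod v DAY) HOUR)) "m" (PySem.Int.floordiv (PySem.Int.mod (PySem.Int.mod v DAY) HOUR) MINUTE)) "s" (PySem.Int.mod (PySem.Int.mod (PySem.Int.mod v DAY) HOUR) MINUTE) := by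
  by_cases hb : v < DAY
  · rw [fdiv_small pos_DAY h0 hb, mod_small pos_DAY h0 hb]
    rw [show condIns d "d" 0 = d by simp [condIns]]
    exact loop_H v d h0 hb
  · have hv : v > 0 := by linarith [not_lt.1 hb, pos_DAY]
    rw [encodeLoop, dif_pos hv, dif_neg (show ¬ v < MINUTE by linarith [not_lt.1 hb, lt_MINUTE_DAY]), dif_neg (show ¬ v < HOUR by linarith [not_lt.1 hb, lt_HOUR_DAY]), dif_neg hb, dif_pos hlt]
    rw [show v - PySem.Int.floordiv v DAY * DAY = PySem.Int.mod v DAY by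
      have := PySem.Int.floordiv_mul_add_mod v DAY; linarith]
    rw [loop_H _ _ (PySem.Int.mod_nonneg v pos_DAY) (PySem.Int.mod_lt v pos_DAY)]
    rw [show condIns d "d" (PySem.Int.floordiv v DAY) = d.insert "d" (PySem.Int.floordiv v DAY) by
      have h1 : (1:Int) ≤ PySem.Int.floordiv v DAY := by
        rw [PySem.Int.le_floordiv_iff_mul_le pos_DAY]; linarith [not_lt.1 hb]
      unfold condIns
      rw [if_neg (by omega)]]


theorem loop_W (v : Int) (d : PySem.Dict String Int) (h0 : 0 ≤ v) (hlt : v < YEAR) :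
    encodeLoop v d = condIns (condIns (condIns (condIns (condIns (d) "w" (PySem.Int.floordiv v WEEK)) "d" (PySem.Int.floordiv (PySem.Int.mod v WEEK) DAY)) "h" (PySem.Int.floordiv (PySem.Int.mod (PySem.Int.mod v WEEK) DAY) HOUR)) "m" (PySem.Int.floordiv (PySem.Int.mod (PySem.Int.mod (PySem.Int.mod v WEEK) DAY) HOUR) MINUTE)) "s" (PySem.Int.mod (PySem.Int.mod (PySem.Int.mod (PySem.Int.mod v WEEK) DAY) HOUR) MINUTE) := by
  by_cases hb : v < WEEK
  · rw [fdiv_small pos_WEEK h0 hb, mod_small pos_WEEK h0 hb]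
    rw [show condIns d "w" 0 = d by simp [condIns]]
    exact loop_D v d h0 hb
  · have hv : v > 0 := by linarith [not_lt.1 hb, pos_WEEK]
    rw [encodeLoop, dif_pos hv, dif_neg (show ¬ v < MINUTE by linarith [not_lt.1 hb, lt_MINUTE_WEEK]), dif_neg (show ¬ v < HOUR by linarith [not_lt.1 hb, lt_HOUR_WEEK]), dif_neg (show ¬ v < DAY by linarith [not_lt.1 hb, lt_DAY_WEEK]), dif_neg hb, dif_pos hlt]
    rw [show v - PySem.Int.floordiv v WEEK * WEEK = PySem.Int.mod v WEEK by
      have := PySem.Int.floordiv_mul_add_mod v WEEK; linarith]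
    rw [loop_D _ _ (PySem.Int.mod_nonneg v pos_WEEK) (PySem.Int.mod_lt v pos_WEEK)]
    rw [show condIns d "w" (PySem.Int.floordiv v WEEK) = d.insert "w" (PySem.Int.floordiv v WEEK) by
      have h1 : (1:Int) ≤ PySem.Int.floordiv v WEEK := by
        rw [PySem.Int.le_floordiv_iff_mul_le pos_WEEK]; linarith [not_lt.1 hb]
      unfold condIns
      rw [if_neg (by omega)]]


theorem loop_Y (v : Int) (d : PySem.Dict String Int) (h0 : 0 ≤ v) :
    encodeLoop v d = condIns (condIns (condIns (condIns (condIns (condIns (d) "y" (PySem.Int.floordiv v YEAR)) "w" (PySem.Int.floordiv (PySem.Int.mod v YEAR) WEEK)) "d" (PySem.Int.floordiv (PySem.Int.mod (PySem.Int.mod v YEAR) WEEK) DAY)) "h" (PySem.Int.floordiv (PySem.Int.mod (PySem.Int.mod (PySem.Int.mod v YEAR) WEEK) DAY) HOUR)) "m" (PySem.Int.floordiv (PySem.Int.mod (PySem.Int.mod (PySem.Int.mod (PySem.Int.mod v YEAR) WEEK) DAY) HOUR) MINUTE)) "s" (PySem.Int.mod (PySem.Int.mod (PySem.Int.mod (PySem.Int.mod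 (PySem.Int.mod v YEAR) WEEK) DAY) HOUR) MINUTE) := by
  by_cases hb : v < YEAR
  · rw [fdiv_small pos_YEAR h0 hb, mod_small pos_YEAR h0 hb]
    rw [show condIns d "y" 0 = d by simp [condIns]]
    exact loop_W v d h0 hb
  · have hv : v > 0 := by linarith [not_lt.1 hb, pos_YEAR]
    rw [encodeLoop, dif_pos hv, dif_neg (show ¬ v < MINUTE by linarith [not_lt.1 hb, lt_MINUTE_YEAR]), dif_neg (show ¬ v < HOUR by linarith [not_lt.1 hb, lt_HOUR_YEAR]), dif_neg (show ¬ v < DAY by linarith [not_lt.1 hb, lt_DAY_YEAR]), dif_neg (show ¬ v < WEEK by linarith [not_lt.1 hb, lt_WEEK_YEAR]), dif_neg hb, dif_pos (not_lt.1 hb : YEAR ≤ v)]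
    rw [show v - PySem.Int.floordiv v YEAR * YEAR = PySem.Int.mod v YEAR by
      have := PySem.Int.floordiv_mul_add_mod v YEAR; linarith]
    rw [loop_W _ _ (PySem.Int.mod_nonneg v pos_YEAR) (PySem.Int.mod_lt v pos_YEAR)]
    rw [show condIns d "y" (PySem.Int.floordiv v YEAR) = d.insert "y" (PySem.Int.floordiv v YEAR) by
      have h1 : (1:Int) ≤ PySem.Int.floordiv v YEAR := by
        rw [PySem.Int.le_floordiv_iff_mul_le pos_YEAR]; linarith [not_lt.1 hb]
      unfold condIns
      rw [if_neg (by omega)]]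


theorem getD_condIns (d : PySem.Dict String Int) (k k' : String) (n : Int) :
    (condIns d k n).getD k' 0 =
      if k' = k then (if n = 0 then d.getD k' 0 else n) else d.getD k' 0 := by
  unfold condIns
  by_cases hk : k' = k
  · subst hk
    by_cases hn : n = 0 <;> simp [hn, PySem.Dict.getD_insert_self]
  · by_cases hn : n = 0 <;> simp [hk, hn, PySem.Dict.getD_insert_of_ne d n 0 hk]

theorem ite_zero_self (n : Int) : (if n = 0 then (0:Int) else n) = n := by
  split_ifs with h
  · omega
  · rfl

-- ===== VERDICT (by name: the statement is the Claim_ definition above) =====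
theorem encode_ttl_spec : Claim_equal_encode_ttl := by
  intro value _
  show encode_ttl value = encode_ttl_alt value
  unfold encode_ttl encode_ttl_alt
  dsimp only
  by_cases hle : value ≤ 0
  · rw [if_pos hle, encodeLoop, dif_neg (by omega : ¬ value > 0)]
    rfl
  · rw [if_neg hle]
    rw [loop_Y value _ (by omega)]
    generalize PySem.Int.floordiv value YEAR = Y
    generalize PySem.Int.mod value YEAR = R1
    generalize PySem.Int.floordiv R1 WEEK = W
    generalize PySem.Int.mod R1 WEEK = R2
    generalize PySem.Int.floordiv R2 DAY = D
    generalize PySem.Int.mod R2 DAY = R3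
    generalize PySem.Int.floordiv R3 HOUR = H
    generalize PySem.Int.mod R3 HOUR = R4
    generalize PySem.Int.floordiv R4 MINUTE = M
    generalize PySem.Int.mod R4 MINUTE = S
    have hbase : ∀ k ∈ ["y", "w", "d", "h", "m", "s"], (PySem.Dict.ofList
        [("y", (0:Int)), ("w", 0), ("d", 0), ("h", 0), ("m", 0), ("s", 0)]).getD k 0 =
        0 := by decide
    simp only [List.mem_cons, List.not_mem_nil, or_false, forall_eq_or_imp, forall_eq] at hbase
    obtain ⟨hb1, hb2, hb3, hb4, hb5, hb6⟩ := hbase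
    simp only [List.foldl, getD_condIns, String.reduceEq, if_true, if_false,
      hb1, hb2, hb3, hb4, hb5, hb6, ite_zero_self]
    split_ifs <;>
      simp_all [List.filter_nil, List.map_cons, List.map_nil]
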